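-- pv_equiv track=rewrite | github.com/star0418-abc/gromacs1 | pipeline/provenance.py | _parse_gromacs_build_features
-- ===== SOURCE A (Python) =====
-- from typing import Any, Dict, List, Optional, TYPE_CHECKING
--
-- def _parse_gromacs_build_features(raw_text: str) -> Dict[str, Optional[str]]:
--     features: Dict[str, Optional[str]] = {
--         "precision": None,
--         "mpi": None,
--         "openmp": None,
--         "simd": None,
--         "gpu_support": None,
--     }
--     key_values: Dict[str, str] = {}
--     for line in (raw_text or "").splitlines():
--         if ":" not in line:
--             continue
--         key, value = line.split(":", 1)
--         key_norm = key.strip().lower()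
--         value_clean = value.strip()
--         if key_norm and value_clean:
--             key_values[key_norm] = value_clean
--
--     for key, value in key_values.items():
--         if features["precision"] is None and "precision" in key:
--             features["precision"] = value
--         if features["mpi"] is None and "mpi" in key:
--             features["mpi"] = value
--         if features["openmp"] is None and "openmp" in key:
--             features["openmp"] = value
--         if features["simd"] is None and "simd" in key:
--             features["simd"] = value
--         if features["gpu_support"] is None and any(tok in key for tok in ("gpu", "cuda", "hip", "sycl", "opencl")):
--             features["gpu_support"] = value
--     return features
-- ===== SOURCE B (Python) =====
-- def _parse_gromacs_build_features(raw_text):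
--     key_values = {}
--     for line in (raw_text or "").splitlines():
--         if ":" not in line:
--             continue
--         key, value = line.split(":", 1)
--         key_norm = key.strip().lower()
--         value_clean = value.strip()
--         if key_norm and value_clean:
--             key_values[key_norm] = value_clean
--     spec = [
--         ("precision", ("precision",)),
--         ("mpi", ("mpi",)),
--         ("openmp", ("openmp",)),
--         ("simd", ("simd",)),
--         ("gpu_support", ("gpu", "cuda", "hip", "sycl", "opencl")),
--     ]
--     return {
--         name: next((v for k, v in key_values.items() if any(t in k for t in tokens)), None)
--         for name, tokens in spec
--     }
-- ===== Notes on version B (the rewrite author's own statement) =====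
-- stated objective: simpler
-- what changed: Instead of A's single pass over the key/value pairs that mutates a five-slot features dict with per-slot unset guards, B builds the same normalized key_values dict and then, per feature from an ordered (name, tokens) spec, takes the value of the first key containing one of its tokens - inverting the loop nesting and replacing the stateful fold with a declarative first-match lookup.
import Mathlib
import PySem

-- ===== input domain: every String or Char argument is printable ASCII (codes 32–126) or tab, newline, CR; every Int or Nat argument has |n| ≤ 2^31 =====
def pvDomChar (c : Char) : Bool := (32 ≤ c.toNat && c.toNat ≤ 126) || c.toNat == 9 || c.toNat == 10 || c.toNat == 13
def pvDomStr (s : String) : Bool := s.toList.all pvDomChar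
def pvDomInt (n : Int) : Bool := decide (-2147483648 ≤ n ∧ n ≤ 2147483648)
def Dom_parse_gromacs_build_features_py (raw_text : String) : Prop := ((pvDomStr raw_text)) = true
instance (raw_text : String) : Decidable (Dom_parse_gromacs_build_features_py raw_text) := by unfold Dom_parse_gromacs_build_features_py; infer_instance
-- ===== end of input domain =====

-- B replaces A's key-outer fold that updates a five-slot features dict by a feature-outer
-- "first matching key wins" scan over the parsed key/value pairs (simpler; no speed claim).

-- ===== PORT A =====
-- the body of A's second loop (one fold step over the features dict), kept as a named helper
def pvStepA (f : PySem.Dict String (Option String)) (kv : String × String) :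
    PySem.Dict String (Option String) :=
  let f := if f.get? "precision" = some none ∧ PySem.Str.isIn "precision" kv.1 then f.insert "precision" (some kv.2) else f
  let f := if f.get? "mpi" = some none ∧ PySem.Str.isIn "mpi" kv.1 then f.insert "mpi" (some kv.2) else f
  let f := if f.get? "openmp" = some none ∧ PySem.Str.isIn "openmp" kv.1 then f.insert "openmp" (some kv.2) else f
  let f := if f.get? "simd" = some none ∧ PySem.Str.isIn "simd" kv.1 then f.insert "simd" (some kv.2) else f
  if f.get? "gpu_support" = some none ∧ (["gpu", "cuda", "hip", "sycl", "opencl"].any (fun tok => PySem.Str.isIn tok kv.1)) then f.insert "gpu_support" (some kv.2) else f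

def parse_gromacs_build_features_py (raw_text : String) : List (String × Option String) :=
  let features : PySem.Dict String (Option String) :=
    PySem.Dict.ofList [("precision", none), ("mpi", none), ("openmp", none),
                       ("simd", none), ("gpu_support", none)]
  -- `(raw_text or "")` equals raw_text for every str ("" is falsy and replaced by "")
  let key_values : PySem.Dict String String :=
    (PySem.Str.splitlines raw_text).foldl (fun kv line =>
      if !(PySem.Str.isIn ":" line) then kv
      else
        -- line.split(":", 1); since ":" ∈ line this yields exactly [key, value]
        let parts := (PySem.Str.splitMax? line ":" 1).getD []
        let key_norm := PySem.Str.lower (PySem.Str.strip (parts.getD 0 ""))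
        let value_clean := PySem.Str.strip (parts.getD 1 "")
        if key_norm ≠ "" ∧ value_clean ≠ "" then kv.insert key_norm value_clean else kv)
      PySem.Dict.empty
  (key_values.items.foldl pvStepA features).items

-- ===== PORT B =====
def pvFeatureSpec : List (String × List String) :=
  [("precision", ["precision"]), ("mpi", ["mpi"]), ("openmp", ["openmp"]),
   ("simd", ["simd"]), ("gpu_support", ["gpu", "cuda", "hip", "sycl", "opencl"])]

def pvKeyValues (raw_text : String) : PySem.Dict String String :=
  (PySem.Str.splitlines raw_text).foldl (fun kv line =>
    if !(PySem.Str.isIn ":" line) then kv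
    else
      let parts := (PySem.Str.splitMax? line ":" 1).getD []
      let key_norm := PySem.Str.lower (PySem.Str.strip (parts.getD 0 ""))
      let value_clean := PySem.Str.strip (parts.getD 1 "")
      if key_norm ≠ "" ∧ value_clean ≠ "" then kv.insert key_norm value_clean else kv)
    PySem.Dict.empty

def parse_gromacs_build_features_py_alt (raw_text : String) : List (String × Option String) :=
  let key_values := pvKeyValues raw_text
  pvFeatureSpec.map (fun ft =>
    (ft.1, (key_values.items.find? (fun kv => ft.2.any (fun t => PySem.Str.isIn t kv.1))).map Prod.snd))

-- ===== PRECONDITION & SPEC =====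
def Spec_parse_gromacs_build_features_py (raw_text : String) (out : List (String × Option String)) : Prop := out = parse_gromacs_build_features_py_alt raw_text
instance (raw_text : String) (out : List (String × Option String)) : Decidable (Spec_parse_gromacs_build_features_py raw_text out) := by unfold Spec_parse_gromacs_build_features_py; infer_instance

-- ===== CLAIM (what is proved, stated in full; the proofs are below) =====
def Claim_equal_parse_gromacs_build_features_py : Prop := ∀ (raw_text : String), Dom_parse_gromacs_build_features_py raw_text → Spec_parse_gromacs_build_features_py raw_text (parse_gromacs_build_features_py raw_text)

-- ===== LEMMAS AND PROOFS =====

/-- A five-slot features dict with A's fixed keys, as a literal. -/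
def pvMkD (p m o s g : Option String) : PySem.Dict String (Option String) :=
  PySem.Dict.mk [("precision", p), ("mpi", m), ("openmp", o), ("simd", s), ("gpu_support", g)]

/-- One slot update of A's loop: set the slot iff still unset and the key matches. -/
def pvUpd (x : Option String) (c : Bool) (v : String) : Option String :=
  if x = none ∧ c then some v else x

/-- What a slot holds after folding the remaining items, given its current value. -/
def pvFill (x : Option String) (toks : List String) (ps : List (String × String)) : Option String :=
  match x with
  | some v => some v
  | none => (ps.find? (fun kv => toks.any (fun t => PySem.Str.isIn t kv.1))).map Prod.snd

theorem pvGetP (p m o s g : Option String) : (pvMkD p m o s g).get? "precision" = some p := by simp [pvMkD, PySem.Dict.get?_mk_cons]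
theorem pvGetM (p m o s g : Option String) : (pvMkD p m o s g).get? "mpi" = some m := by simp [pvMkD, PySem.Dict.get?_mk_cons]
theorem pvGetO (p m o s g : Option String) : (pvMkD p m o s g).get? "openmp" = some o := by simp [pvMkD, PySem.Dict.get?_mk_cons]
theorem pvGetS (p m o s g : Option String) : (pvMkD p m o s g).get? "simd" = some s := by simp [pvMkD, PySem.Dict.get?_mk_cons]
theorem pvGetG (p m o s g : Option String) : (pvMkD p m o s g).get? "gpu_support" = some g := by simp [pvMkD, PySem.Dict.get?_mk_cons]
theorem pvInsP (p m o s g x : Option String) : (pvMkD p m o s g).insert "precision" x = pvMkD x m o s g := by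
  apply PySem.Dict.ext; simp [pvMkD, PySem.Dict.items_insert, PySem.Dict.contains_mk]
theorem pvInsM (p m o s g x : Option String) : (pvMkD p m o s g).insert "mpi" x = pvMkD p x o s g := by
  apply PySem.Dict.ext; simp [pvMkD, PySem.Dict.items_insert, PySem.Dict.contains_mk]
theorem pvInsO (p m o s g x : Option String) : (pvMkD p m o s g).insert "openmp" x = pvMkD p m x s g := by
  apply PySem.Dict.ext; simp [pvMkD, PySem.Dict.items_insert, PySem.Dict.contains_mk]
theorem pvInsS (p m o s g x : Option String) : (pvMkD p m o s g).insert "simd" x = pvMkD p m o x g := by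
  apply PySem.Dict.ext; simp [pvMkD, PySem.Dict.items_insert, PySem.Dict.contains_mk]
theorem pvInsG (p m o s g x : Option String) : (pvMkD p m o s g).insert "gpu_support" x = pvMkD p m o s x := by
  apply PySem.Dict.ext; simp [pvMkD, PySem.Dict.items_insert, PySem.Dict.contains_mk]

set_option maxHeartbeats 1600000 in
theorem pvStepA_mk (p m o s g : Option String) (k v : String) :
    pvStepA (pvMkD p m o s g) (k, v) =
      pvMkD (pvUpd p (PySem.Str.isIn "precision" k) v)
            (pvUpd m (PySem.Str.isIn "mpi" k) v)
            (pvUpd o (PySem.Str.isIn "openmp" k) v)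
            (pvUpd s (PySem.Str.isIn "simd" k) v)
            (pvUpd g (["gpu", "cuda", "hip", "sycl", "opencl"].any (fun tok => PySem.Str.isIn tok k)) v) := by
  unfold pvStepA
  simp only [pvGetP, pvGetM, pvGetO, pvGetS, pvGetG, pvInsP, pvInsM, pvInsO, pvInsS, pvInsG]
  split_ifs <;>
    simp_all [pvUpd, pvGetM, pvGetO, pvGetS, pvGetG, pvInsM, pvInsO, pvInsS, pvInsG] <;>
    split_ifs <;> simp_all

theorem pvFill_cons (x : Option String) (toks : List String) (k v : String)
    (ps : List (String × String)) :
    pvFill x toks ((k, v) :: ps) = pvFill (pvUpd x (toks.any (fun t => PySem.Str.isIn t k)) v) toks ps := by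
  cases x with
  | some w => rfl
  | none =>
    by_cases h : toks.any (fun t => PySem.Str.isIn t k) = true
    · simp only [pvFill, pvUpd, List.find?_cons] at h ⊢
      simp at h
      have h' : (toks.any fun t => PySem.Chars.isIn t.toList k.toList) = true := by
        simp [List.any_eq_true]; exact h
      simp [h']
    · simp only [pvFill, pvUpd, List.find?_cons] at h ⊢
      simp at h
      have h' : (toks.any fun t => PySem.Chars.isIn t.toList k.toList) = false := by
        simp [List.any_eq_false]; exact h
      simp [h']

theorem pvFoldA (ps : List (String × String)) (p m o s g : Option String) :
    ps.foldl pvStepA (pvMkD p m o s g) =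
      pvMkD (pvFill p ["precision"] ps) (pvFill m ["mpi"] ps) (pvFill o ["openmp"] ps)
            (pvFill s ["simd"] ps) (pvFill g ["gpu", "cuda", "hip", "sycl", "opencl"] ps) := by
  induction ps generalizing p m o s g with
  | nil => cases p <;> cases m <;> cases o <;> cases s <;> cases g <;> rfl
  | cons hd tl ih =>
    obtain ⟨k, v⟩ := hd
    rw [List.foldl_cons, pvStepA_mk, ih]
    simp [pvFill_cons]

theorem pvMain (d : PySem.Dict String String) :
    (d.items.foldl pvStepA
      (PySem.Dict.ofList [("precision", none), ("mpi", none), ("openmp", none),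
                          ("simd", none), ("gpu_support", none)])).items =
      pvFeatureSpec.map (fun ft =>
        (ft.1, (d.items.find? (fun kv => ft.2.any (fun t => PySem.Str.isIn t kv.1))).map Prod.snd)) := by
  have h0 : PySem.Dict.ofList
      [("precision", (none : Option String)), ("mpi", none), ("openmp", none),
       ("simd", none), ("gpu_support", none)] = pvMkD none none none none none := by decide
  rw [h0, pvFoldA]
  simp [pvMkD, pvFeatureSpec, pvFill]

-- ===== VERDICT (by name: the statement is the Claim_ definition above) =====
theorem parse_gromacs_build_features_py_spec : Claim_equal_parse_gromacs_build_features_py := by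
  intro raw_text _
  unfold Spec_parse_gromacs_build_features_py parse_gromacs_build_features_py
    parse_gromacs_build_features_py_alt
  exact pvMain (pvKeyValues raw_text)
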